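-- pv_equiv track=rewrite | github.com/ismimajhoul/endopath-wiki-test | exploratory/preprocessing/preprocess_dossier_gyneco.py | creation_regex
-- ===== SOURCE A (Python) =====
-- def creation_regex(string:str):
--     """
--     Create a flexible regular expression pattern from a given string.
--
--     This function converts each character in the input string into a character class,
--     and treats '?' specially to allow optional characters.
--
--     Args:
--     pattern (str): The input string to convert into a regex pattern
--
--     Returns:
--     str: A string representing the created regex pattern
--     """
--     str_temp = '('
--     for c in string:
--         if c =='?':
--             str_temp = str_temp+')['+c+']('
--         else:
--             str_temp = str_temp+'['+c+']'
--     str_temp = str_temp +')'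
--     return str_temp
-- ===== SOURCE B (Python) =====
-- def creation_regex(string: str):
--     segments = string.split('?')
--     fragments = [''.join('[' + c + ']' for c in seg) for seg in segments]
--     return '(' + ')[?]('.join(fragments) + ')'
-- ===== Notes on version B (the rewrite author's own statement) =====
-- stated objective: faster
-- what changed: B splits the string on the question-mark character once and joins per-segment fragments with the fixed group separator, instead of A's character-by-character string accumulation; repeated string concatenation in a loop is quadratic while split/join is linear.
import Mathlib
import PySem

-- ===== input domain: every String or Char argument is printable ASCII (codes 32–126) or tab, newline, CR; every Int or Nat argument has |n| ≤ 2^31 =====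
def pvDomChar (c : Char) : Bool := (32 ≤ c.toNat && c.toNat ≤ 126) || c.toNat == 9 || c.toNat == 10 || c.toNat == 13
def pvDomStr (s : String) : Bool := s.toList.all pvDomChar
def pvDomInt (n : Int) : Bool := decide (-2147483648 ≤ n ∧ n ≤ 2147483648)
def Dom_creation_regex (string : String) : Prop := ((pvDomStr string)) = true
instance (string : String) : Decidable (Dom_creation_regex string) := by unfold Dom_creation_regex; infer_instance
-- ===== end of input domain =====

-- B restructures A's character-by-character accumulator loop as split-on-'?' / per-segment join / join with ')[?](' (objective: simpler).

-- ===== PORT A =====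
def creation_regex (string : String) : String :=
  String.mk
    ((string.toList.foldl
      (fun acc c =>
        if c == '?' then acc ++ [')', '['] ++ [c] ++ [']', '(']
        else acc ++ ['['] ++ [c] ++ [']'])
      ['(']) ++ [')'])

-- ===== PORT B =====
-- fragment of one '?'-free segment: ''.join('[' + c + ']' for c in seg)
def pvFrag (seg : List Char) : List Char := (seg.map (fun c => ['['] ++ [c] ++ [']'])).flatten

def creation_regex_alt (string : String) : String :=
  let segments := string.toList.splitOn '?'       -- string.split('?'), single-char separator
  let fragments := segments.map pvFrag
  String.mk (['('] ++ List.intercalate [')', '[', '?', ']', '('] fragments ++ [')'])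

-- ===== PRECONDITION & SPEC =====
def Spec_creation_regex (string : String) (out : String) : Prop := out = creation_regex_alt string
instance (string : String) (out : String) : Decidable (Spec_creation_regex string out) := by unfold Spec_creation_regex; infer_instance

-- ===== CLAIM (what is proved, stated in full; the proofs are below) =====
def Claim_equal_creation_regex : Prop := ∀ (string : String), Dom_creation_regex string → Spec_creation_regex string (creation_regex string)

-- ===== LEMMAS AND PROOFS =====
theorem pv_intercalate_head_append (sep a x : List Char) (ys : List (List Char)) :
    List.intercalate sep ((a ++ x) :: ys) = a ++ List.intercalate sep (x :: ys) := by
  cases ys <;> simp [List.intercalate, List.intersperse]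

theorem pv_loop_eq (l acc : List Char) :
    (l.foldl
      (fun acc c =>
        if c == '?' then acc ++ [')', '['] ++ [c] ++ [']', '(']
        else acc ++ ['['] ++ [c] ++ [']'])
      acc)
    = acc ++ List.intercalate [')', '[', '?', ']', '('] ((l.splitOn '?').map pvFrag) := by
  induction l generalizing acc with
  | nil => simp [List.splitOn, List.splitOnP_nil, List.intercalate, pvFrag]
  | cons c t ih =>
    obtain ⟨h, t', ht⟩ : ∃ h t', t.splitOn '?' = h :: t' := by
      rcases e : t.splitOn '?' with _ | ⟨h, t'⟩
      · exact absurd e (List.splitOnP_ne_nil _ t)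
      · exact ⟨h, t', rfl⟩
    by_cases hc : c = '?'
    · subst hc
      simp only [List.foldl_cons, if_pos (by decide : ('?' == '?') = true), ih,
        List.splitOn, List.splitOnP_cons]
      simp only [List.splitOn] at ht
      simp [ht, pvFrag, List.intercalate]
    · have hcb : (c == '?') = false := by simp [hc]
      simp only [List.foldl_cons, hcb, Bool.false_eq_true, if_false, ih,
        List.splitOn, List.splitOnP_cons]
      simp only [List.splitOn] at ht
      rw [ht]
      simp only [List.modifyHead_cons, List.map_cons]
      have hfr : pvFrag (c :: h) = (['['] ++ [c] ++ [']']) ++ pvFrag h := by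
        simp [pvFrag]
      rw [hfr, pv_intercalate_head_append]
      simp [List.append_assoc]

-- ===== VERDICT (by name: the statement is the Claim_ definition above) =====
theorem creation_regex_spec : Claim_equal_creation_regex := by
  intro s _
  unfold Spec_creation_regex creation_regex creation_regex_alt
  rw [pv_loop_eq]
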